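-- pv_equiv track=rewrite | github.com/nataliatabjab/My-Website | docs/csc384/A3/starter/heuristic_test.py | _potential_mobility
-- ===== SOURCE A (Python) =====
-- def _potential_mobility(board, color):
--     n = len(board)
--     dirs = ((1, 0), (-1, 0), (0, 1), (0, -1),
--             (1, 1), (1, -1), (-1, 1), (-1, -1))
--
--     def adj_empty_to(colour):
--         count = 0
--         for r in range(n):
--             for c in range(n):
--                 if board[r][c] != 0:
--                     continue
--                 for dr, dc in dirs:
--                     nr, nc = r + dr, c + dc
--                     if 0 <= nr < n and 0 <= nc < n and board[nr][nc] == colour: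
--                         count += 1
--                         break
--         return count
--
--     return adj_empty_to(color) - adj_empty_to(3 - color)
-- ===== SOURCE B (Python) =====
-- def _potential_mobility(board, color):
--     n = len(board)
--     dirs = ((1, 0), (-1, 0), (0, 1), (0, -1),
--             (1, 1), (1, -1), (-1, 1), (-1, -1))
--     other = 3 - color
--     empties_near_color = set()
--     empties_near_other = set()
--     for r in range(n):
--         for c in range(n):
--             v = board[r][c]
--             if v == color:
--                 target = empties_near_color
--             elif v == other:
--                 target = empties_near_other
--             else:
--                 continue
--             for dr, dc in dirs:
--                 nr, nc = r + dr, c + dc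
--                 if 0 <= nr < n and 0 <= nc < n and board[nr][nc] == 0:
--                     target.add((nr, nc))
--     return len(empties_near_color) - len(empties_near_other)
-- ===== Notes on version B (the rewrite author's own statement) =====
-- stated objective: alternative
-- what changed: Instead of two full-board scans over empty cells each probing all eight neighbors with a break, B makes one scan over colored cells and collects the in-bounds empty neighbors of color and of 3-color into two sets of coordinates; the set sizes reproduce the count-each-empty-once semantics of the break, and the result is the difference of the two set sizes.
import Mathlib
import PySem

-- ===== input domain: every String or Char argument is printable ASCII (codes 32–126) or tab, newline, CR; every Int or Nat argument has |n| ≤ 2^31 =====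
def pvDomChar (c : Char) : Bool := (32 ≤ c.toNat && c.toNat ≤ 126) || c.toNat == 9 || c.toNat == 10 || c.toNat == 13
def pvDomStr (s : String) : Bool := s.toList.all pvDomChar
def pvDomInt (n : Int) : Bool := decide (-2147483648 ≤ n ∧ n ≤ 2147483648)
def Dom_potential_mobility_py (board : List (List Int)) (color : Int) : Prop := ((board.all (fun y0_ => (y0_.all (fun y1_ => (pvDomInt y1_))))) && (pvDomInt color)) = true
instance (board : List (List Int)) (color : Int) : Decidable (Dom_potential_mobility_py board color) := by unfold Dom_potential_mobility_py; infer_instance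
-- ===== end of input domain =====

-- B replaces A's two scans over empty cells (eight-neighbor probe with a break each) by one
-- scan over colored cells that collects their in-bounds empty neighbors into two coordinate
-- sets, returning the difference of the set sizes: an alternative decomposition, same cost.

-- ===== PORT A =====
-- the eight direction offsets, shared by both ports (a literal tuple in both Pythons)
def pvDirs : List (Int × Int) :=
  [(1, 0), (-1, 0), (0, 1), (0, -1), (1, 1), (1, -1), (-1, 1), (-1, -1)]

-- board[r][c]; exact on Pre_ (both indices in range there)
def pvCell (board : List (List Int)) (r c : Int) : Int :=
  PySem.List.pyGetD (PySem.List.pyGetD board r []) c 0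

-- A's helper adj_empty_to(colour): scan all cells, count empties with ≥1 colour neighbor (break)
def pvAdjEmptyTo (board : List (List Int)) (n colour : Int) : Int :=
  (PySem.List.pyRange 0 n 1).foldl (fun count r =>
    (PySem.List.pyRange 0 n 1).foldl (fun count c =>
      if pvCell board r c ≠ 0 then count
      else if pvDirs.any (fun d =>
          decide (0 ≤ r + d.1 ∧ r + d.1 < n ∧ 0 ≤ c + d.2 ∧ c + d.2 < n) &&
          (pvCell board (r + d.1) (c + d.2) == colour)) then
        count + 1
      else count) count) 0

def potential_mobility_py (board : List (List Int)) (color : Int) : Int :=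
  let n : Int := board.length
  pvAdjEmptyTo board n color - pvAdjEmptyTo board n (3 - color)

-- ===== PORT B =====
-- B's inner loop over dirs: add every in-bounds empty neighbor of (r,c) to the set
def pvAddEmptyNbrs (board : List (List Int)) (n r c : Int)
    (s : PySem.Set (Int × Int)) : PySem.Set (Int × Int) :=
  pvDirs.foldl (fun s d =>
    if decide (0 ≤ r + d.1 ∧ r + d.1 < n ∧ 0 ≤ c + d.2 ∧ c + d.2 < n) &&
       (pvCell board (r + d.1) (c + d.2) == 0) then
      PySem.Set.add s (r + d.1, c + d.2)
    else s) s

-- B's loop body for one cell (v == color → first set; v == other → second set; else skip)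
def pvStepB (board : List (List Int)) (n color : Int)
    (p : PySem.Set (Int × Int) × PySem.Set (Int × Int)) (rc : Int × Int) :
    PySem.Set (Int × Int) × PySem.Set (Int × Int) :=
  let v := pvCell board rc.1 rc.2
  if v = color then (pvAddEmptyNbrs board n rc.1 rc.2 p.1, p.2)
  else if v = 3 - color then (p.1, pvAddEmptyNbrs board n rc.1 rc.2 p.2)
  else p

def potential_mobility_py_alt (board : List (List Int)) (color : Int) : Int :=
  let n : Int := board.length
  let p := (PySem.List.pyRange 0 n 1).foldl (fun p r =>
    (PySem.List.pyRange 0 n 1).foldl (fun p c => pvStepB board n color p (r, c)) p)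
    (PySem.Set.empty, PySem.Set.empty)
  (p.1.length : Int) - (p.2.length : Int)

-- ===== PRECONDITION & SPEC =====
-- Pre_: exactly the inputs where Python A returns (it indexes board[r][c] for all r,c < len(board);
-- a row shorter than the board raises IndexError in both A and B)
def Pre_potential_mobility_py (board : List (List Int)) (color : Int) : Prop :=
  ∀ row ∈ board, board.length ≤ row.length

instance (board : List (List Int)) (color : Int) : Decidable (Pre_potential_mobility_py board color) := by unfold Pre_potential_mobility_py; infer_instance

def pvWitness_potential_mobility_py : List (List Int) × Int := ([[0, 1], [2, 0]], 1)

def Spec_potential_mobility_py (board : List (List Int)) (color : Int) (out : Int) : Prop := out = potential_mobility_py_alt board color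
instance (board : List (List Int)) (color : Int) (out : Int) : Decidable (Spec_potential_mobility_py board color out) := by unfold Spec_potential_mobility_py; infer_instance

-- ===== CLAIM (what is proved, stated in full; the proofs are below) =====
def Claim_equal_potential_mobility_py : Prop := ∀ (board : List (List Int)) (color : Int), Dom_potential_mobility_py board color → Pre_potential_mobility_py board color → Spec_potential_mobility_py board color (potential_mobility_py board color)

-- ===== LEMMAS AND PROOFS =====

-- the grid as a flat list of coordinates
def pvCells (n : Int) : List (Int × Int) :=
  (PySem.List.pyRange 0 n 1).flatMap (fun r => (PySem.List.pyRange 0 n 1).map (fun c => (r, c)))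

-- in-bounds predicate
def pvInb (n : Int) (e : Int × Int) : Prop :=
  0 ≤ e.1 ∧ e.1 < n ∧ 0 ≤ e.2 ∧ e.2 < n

-- e is an in-bounds empty neighbor of q
def pvNbr (board : List (List Int)) (n : Int) (q e : Int × Int) : Prop :=
  ∃ d ∈ pvDirs, e = (q.1 + d.1, q.2 + d.2) ∧ pvInb n e ∧ pvCell board e.1 e.2 = 0

-- A's per-cell test, as a Bool predicate on a coordinate
def pvACond (board : List (List Int)) (n colour : Int) (e : Int × Int) : Bool :=
  (pvCell board e.1 e.2 == 0) && pvDirs.any (fun d =>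
    decide (0 ≤ e.1 + d.1 ∧ e.1 + d.1 < n ∧ 0 ≤ e.2 + d.2 ∧ e.2 + d.2 < n) &&
    (pvCell board (e.1 + d.1) (e.2 + d.2) == colour))

lemma pv_foldl_grid {σ : Type} (l₁ l₂ : List Int) (f : σ → Int → Int → σ) (init : σ) :
    l₁.foldl (fun s r => l₂.foldl (fun s c => f s r c) s) init
      = (l₁.flatMap (fun r => l₂.map (fun c => (r, c)))).foldl (fun s e => f s e.1 e.2) init := by
  induction l₁ generalizing init with
  | nil => rfl
  | cons r t ih => simp [List.flatMap_cons, List.foldl_append, List.foldl_map, ih]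

lemma pv_mem_cells (n : Int) (e : Int × Int) : e ∈ pvCells n ↔ pvInb n e := by
  simp only [pvCells, List.mem_flatMap, List.mem_map, PySem.List.mem_pyRange_one, pvInb]
  constructor
  · rintro ⟨r, hr, c, hc, rfl⟩; exact ⟨hr.1, hr.2, hc.1, hc.2⟩
  · rintro ⟨h1, h2, h3, h4⟩; exact ⟨e.1, ⟨h1, h2⟩, e.2, ⟨h3, h4⟩, rfl⟩

lemma pv_nodup_cells (n : Int) : (pvCells n).Nodup := by
  rw [pvCells, List.nodup_flatMap]
  refine ⟨fun r _ => List.Nodup.map (fun a b h => by simpa using h)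
    (PySem.List.nodup_pyRange_one 0 n), ?_⟩
  refine (PySem.List.nodup_pyRange_one 0 n).imp ?_
  intro a b hab
  simp only [Function.onFun, List.disjoint_left, List.mem_map]
  rintro x ⟨y, _, rfl⟩ ⟨z, _, hz⟩
  exact (hab (by simpa using congrArg Prod.fst hz.symm)).elim

lemma pv_neg_mem_dirs : ∀ d ∈ pvDirs, ((-d.1, -d.2) : Int × Int) ∈ pvDirs := by decide

-- A's port counts the grid cells satisfying pvACond
lemma pv_adjEmptyTo_eq_countP (board : List (List Int)) (n colour : Int) :
    pvAdjEmptyTo board n colour = ((pvCells n).countP (pvACond board n colour) : Int) := by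
  rw [pvAdjEmptyTo, pv_foldl_grid, ← pvCells]
  have hcongr := PySem.List.foldl_congr_mem (pvCells n)
    (fun (s : Int) (e : Int × Int) =>
      if pvCell board e.1 e.2 ≠ 0 then s
      else if pvDirs.any (fun d =>
          decide (0 ≤ e.1 + d.1 ∧ e.1 + d.1 < n ∧ 0 ≤ e.2 + d.2 ∧ e.2 + d.2 < n) &&
          (pvCell board (e.1 + d.1) (e.2 + d.2) == colour)) then s + 1 else s)
    (fun s e => if pvACond board n colour e then s + 1 else s) 0
    (by
      intro acc e _
      dsimp only
      by_cases h0 : pvCell board e.1 e.2 = 0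
      · rw [if_neg (by simp [h0])]
        by_cases hany : (pvDirs.any fun d =>
            decide (0 ≤ e.1 + d.1 ∧ e.1 + d.1 < n ∧ 0 ≤ e.2 + d.2 ∧ e.2 + d.2 < n) &&
            (pvCell board (e.1 + d.1) (e.2 + d.2) == colour)) = true
        · have hc : pvACond board n colour e = true := by
            unfold pvACond
            rw [h0, hany]
            rfl
          rw [hc, hany]
        · rw [Bool.not_eq_true] at hany
          have hc : pvACond board n colour e = false := by
            unfold pvACond
            rw [hany, Bool.and_false]
          rw [hc, hany]
      · rw [if_pos (by simp [h0])]
        have hc : pvACond board n colour e = false := by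
          unfold pvACond
          have hb : (pvCell board e.1 e.2 == 0) = false := by simp [h0]
          rw [hb, Bool.false_and]
        rw [hc]
        simp)
  rw [hcongr, PySem.List.foldl_if_add_one]
  ring

-- membership after one pvAddEmptyNbrs call
lemma pv_mem_addEmptyNbrs (board : List (List Int)) (n r c : Int)
    (s : PySem.Set (Int × Int)) (e : Int × Int) :
    e ∈ pvAddEmptyNbrs board n r c s ↔ e ∈ s ∨ pvNbr board n (r, c) e := by
  rw [pvAddEmptyNbrs]
  have main : ∀ (l : List (Int × Int)) (s : PySem.Set (Int × Int)),
      e ∈ l.foldl (fun s d =>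
        if decide (0 ≤ r + d.1 ∧ r + d.1 < n ∧ 0 ≤ c + d.2 ∧ c + d.2 < n) &&
           (pvCell board (r + d.1) (c + d.2) == 0) then
          PySem.Set.add s (r + d.1, c + d.2)
        else s) s ↔
      e ∈ s ∨ ∃ d ∈ l, e = (r + d.1, c + d.2) ∧
        (0 ≤ r + d.1 ∧ r + d.1 < n ∧ 0 ≤ c + d.2 ∧ c + d.2 < n) ∧
        pvCell board (r + d.1) (c + d.2) = 0 := by
    intro l
    induction l with
    | nil => intro s; simp
    | cons a t ih =>
      intro s
      simp only [List.foldl_cons]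
      by_cases h : (decide (0 ≤ r + a.1 ∧ r + a.1 < n ∧ 0 ≤ c + a.2 ∧ c + a.2 < n) &&
          (pvCell board (r + a.1) (c + a.2) == 0)) = true
      · have h' := h
        simp only [Bool.and_eq_true, decide_eq_true_eq, beq_iff_eq] at h'
        rw [if_pos h, ih, PySem.Set.mem_add]
        constructor
        · rintro ((hs | rfl) | ⟨d, hd, rfl, hh⟩)
          · exact Or.inl hs
          · exact Or.inr ⟨a, List.mem_cons_self, rfl, h'.1, h'.2⟩
          · exact Or.inr ⟨d, List.mem_cons_of_mem _ hd, rfl, hh⟩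
        · rintro (hs | ⟨d, hd, rfl, hh⟩)
          · exact Or.inl (Or.inl hs)
          · rcases List.mem_cons.mp hd with rfl | hd
            · exact Or.inl (Or.inr rfl)
            · exact Or.inr ⟨d, hd, rfl, hh⟩
      · have h' := h
        simp only [Bool.and_eq_true, decide_eq_true_eq, beq_iff_eq, not_and_or] at h'
        rw [if_neg h, ih]
        constructor
        · rintro (hs | ⟨d, hd, rfl, hh⟩)
          · exact Or.inl hs
          · exact Or.inr ⟨d, List.mem_cons_of_mem _ hd, rfl, hh⟩
        · rintro (hs | ⟨d, hd, rfl, hh⟩)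
          · exact Or.inl hs
          · rcases List.mem_cons.mp hd with rfl | hd
            · exact absurd hh (by tauto)
            · exact Or.inr ⟨d, hd, rfl, hh⟩
  rw [main]
  apply or_congr Iff.rfl
  simp only [pvNbr, pvInb]
  constructor
  · rintro ⟨d, hd, rfl, hb, h0⟩
    exact ⟨d, hd, rfl, ⟨hb.1, hb.2.1, hb.2.2.1, hb.2.2.2⟩, h0⟩
  · rintro ⟨d, hd, rfl, hb, h0⟩
    exact ⟨d, hd, rfl, ⟨hb.1, hb.2.1, hb.2.2.1, hb.2.2.2⟩, h0⟩

lemma pv_nodup_addEmptyNbrs (board : List (List Int)) (n r c : Int)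
    (s : PySem.Set (Int × Int)) (hs : s.Nodup) : (pvAddEmptyNbrs board n r c s).Nodup := by
  rw [pvAddEmptyNbrs]
  have main : ∀ (l : List (Int × Int)) (s : PySem.Set (Int × Int)), s.Nodup →
      (l.foldl (fun s d =>
        if decide (0 ≤ r + d.1 ∧ r + d.1 < n ∧ 0 ≤ c + d.2 ∧ c + d.2 < n) &&
           (pvCell board (r + d.1) (c + d.2) == 0) then
          PySem.Set.add s (r + d.1, c + d.2)
        else s) s).Nodup := by
    intro l
    induction l with
    | nil => exact fun s hs => hs
    | cons a t ih =>
      intro s hs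
      simp only [List.foldl_cons]
      split
      · exact ih _ (PySem.Set.nodup_add _ _ hs)
      · exact ih _ hs
  exact main pvDirs s hs

-- joint characterization of both sets after folding pvStepB over a cell list
lemma pv_foldB_mem (board : List (List Int)) (n color : Int) (e : Int × Int)
    (hne : color ≠ 3 - color) :
    ∀ (l : List (Int × Int)) (sc so : PySem.Set (Int × Int)),
      (e ∈ (l.foldl (pvStepB board n color) (sc, so)).1 ↔
        e ∈ sc ∨ ∃ q ∈ l, pvCell board q.1 q.2 = color ∧ pvNbr board n q e) ∧
      (e ∈ (l.foldl (pvStepB board n color) (sc, so)).2 ↔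
        e ∈ so ∨ ∃ q ∈ l, pvCell board q.1 q.2 = 3 - color ∧ pvNbr board n q e) := by
  intro l
  induction l with
  | nil => simp
  | cons a t ih =>
    intro sc so
    by_cases h1 : pvCell board a.1 a.2 = color
    · have hstep : pvStepB board n color (sc, so) a =
          (pvAddEmptyNbrs board n a.1 a.2 sc, so) := by
        simp only [pvStepB]; rw [if_pos h1]
      simp only [List.foldl_cons, hstep]
      refine ⟨(ih _ _).1.trans ?_, (ih _ _).2.trans ?_⟩
      · rw [pv_mem_addEmptyNbrs]
        constructor
        · rintro ((hs | hn) | ⟨q, hq, hqc, hqn⟩)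
          · exact Or.inl hs
          · exact Or.inr ⟨a, List.mem_cons_self, h1, hn⟩
          · exact Or.inr ⟨q, List.mem_cons_of_mem _ hq, hqc, hqn⟩
        · rintro (hs | ⟨q, hq, hqc, hqn⟩)
          · exact Or.inl (Or.inl hs)
          · rcases List.mem_cons.mp hq with rfl | hq
            · exact Or.inl (Or.inr hqn)
            · exact Or.inr ⟨q, hq, hqc, hqn⟩
      · constructor
        · rintro (hs | ⟨q, hq, hqc, hqn⟩)
          · exact Or.inl hs
          · exact Or.inr ⟨q, List.mem_cons_of_mem _ hq, hqc, hqn⟩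
        · rintro (hs | ⟨q, hq, hqc, hqn⟩)
          · exact Or.inl hs
          · rcases List.mem_cons.mp hq with rfl | hq
            · exact (hne (h1.symm.trans hqc)).elim
            · exact Or.inr ⟨q, hq, hqc, hqn⟩
    · by_cases h2 : pvCell board a.1 a.2 = 3 - color
      · have hstep : pvStepB board n color (sc, so) a =
            (sc, pvAddEmptyNbrs board n a.1 a.2 so) := by
          simp only [pvStepB]; rw [if_neg h1, if_pos h2]
        simp only [List.foldl_cons, hstep]
        refine ⟨(ih _ _).1.trans ?_, (ih _ _).2.trans ?_⟩
        · constructor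
          · rintro (hs | ⟨q, hq, hqc, hqn⟩)
            · exact Or.inl hs
            · exact Or.inr ⟨q, List.mem_cons_of_mem _ hq, hqc, hqn⟩
          · rintro (hs | ⟨q, hq, hqc, hqn⟩)
            · exact Or.inl hs
            · rcases List.mem_cons.mp hq with rfl | hq
              · exact (h1 hqc).elim
              · exact Or.inr ⟨q, hq, hqc, hqn⟩
        · rw [pv_mem_addEmptyNbrs]
          constructor
          · rintro ((hs | hn) | ⟨q, hq, hqc, hqn⟩)
            · exact Or.inl hs
            · exact Or.inr ⟨a, List.mem_cons_self, h2, hn⟩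
            · exact Or.inr ⟨q, List.mem_cons_of_mem _ hq, hqc, hqn⟩
          · rintro (hs | ⟨q, hq, hqc, hqn⟩)
            · exact Or.inl (Or.inl hs)
            · rcases List.mem_cons.mp hq with rfl | hq
              · exact Or.inl (Or.inr hqn)
              · exact Or.inr ⟨q, hq, hqc, hqn⟩
      · have hstep : pvStepB board n color (sc, so) a = (sc, so) := by
          simp only [pvStepB]; rw [if_neg h1, if_neg h2]
        simp only [List.foldl_cons, hstep]
        refine ⟨(ih _ _).1.trans ?_, (ih _ _).2.trans ?_⟩
        · constructor
          · rintro (hs | ⟨q, hq, hqc, hqn⟩)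
            · exact Or.inl hs
            · exact Or.inr ⟨q, List.mem_cons_of_mem _ hq, hqc, hqn⟩
          · rintro (hs | ⟨q, hq, hqc, hqn⟩)
            · exact Or.inl hs
            · rcases List.mem_cons.mp hq with rfl | hq
              · exact (h1 hqc).elim
              · exact Or.inr ⟨q, hq, hqc, hqn⟩
        · constructor
          · rintro (hs | ⟨q, hq, hqc, hqn⟩)
            · exact Or.inl hs
            · exact Or.inr ⟨q, List.mem_cons_of_mem _ hq, hqc, hqn⟩
          · rintro (hs | ⟨q, hq, hqc, hqn⟩)
            · exact Or.inl hs
            · rcases List.mem_cons.mp hq with rfl | hq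
              · exact (h2 hqc).elim
              · exact Or.inr ⟨q, hq, hqc, hqn⟩

lemma pv_foldB_nodup (board : List (List Int)) (n color : Int) :
    ∀ (l : List (Int × Int)) (sc so : PySem.Set (Int × Int)), sc.Nodup → so.Nodup →
      (l.foldl (pvStepB board n color) (sc, so)).1.Nodup ∧
      (l.foldl (pvStepB board n color) (sc, so)).2.Nodup := by
  intro l
  induction l with
  | nil => exact fun sc so h1 h2 => ⟨h1, h2⟩
  | cons a t ih =>
    intro sc so h1 h2
    simp only [List.foldl_cons, pvStepB]
    split
    · exact ih _ _ (pv_nodup_addEmptyNbrs _ _ _ _ _ h1) h2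
    · split
      · exact ih _ _ h1 (pv_nodup_addEmptyNbrs _ _ _ _ _ h2)
      · exact ih _ _ h1 h2

-- symmetry: e satisfies A's test iff some colored grid cell has e as empty neighbor
lemma pv_cond_iff (board : List (List Int)) (n colour : Int) (e : Int × Int)
    (he : e ∈ pvCells n) :
    pvACond board n colour e = true ↔
      ∃ q ∈ pvCells n, pvCell board q.1 q.2 = colour ∧ pvNbr board n q e := by
  rw [pv_mem_cells] at he
  simp only [pvACond, Bool.and_eq_true, List.any_eq_true, Bool.and_eq_true, decide_eq_true_eq,
    beq_iff_eq]
  constructor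
  · rintro ⟨h0, d, hd, hb, hc⟩
    exact ⟨(e.1 + d.1, e.2 + d.2), (pv_mem_cells _ _).mpr ⟨hb.1, hb.2.1, hb.2.2.1, hb.2.2.2⟩,
      hc, (-d.1, -d.2), pv_neg_mem_dirs d hd, by simp, he, h0⟩
  · rintro ⟨q, hq, hqc, d, hd, he', -, h0⟩
    rw [pv_mem_cells] at hq
    obtain ⟨ha, hb2⟩ := Prod.ext_iff.mp he'
    simp only at ha hb2
    obtain ⟨hq1, hq2, hq3, hq4⟩ := hq
    refine ⟨h0, (-d.1, -d.2), pv_neg_mem_dirs d hd, by simp; omega, ?_⟩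
    have e1 : e.1 + ((-d.1, -d.2) : Int × Int).1 = q.1 := by simp; omega
    have e2 : e.2 + ((-d.1, -d.2) : Int × Int).2 = q.2 := by simp; omega
    rw [e1, e2]; exact hqc

-- each final set has exactly as many elements as A's helper counts (for its colour)
lemma pv_set_length (board : List (List Int)) (n color : Int) (hne : color ≠ 3 - color) :
    (((pvCells n).foldl (pvStepB board n color) (PySem.Set.empty, PySem.Set.empty)).1.length : Int)
        = pvAdjEmptyTo board n color ∧
    (((pvCells n).foldl (pvStepB board n color) (PySem.Set.empty, PySem.Set.empty)).2.length : Int)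
        = pvAdjEmptyTo board n (3 - color) := by
  have hnd := pv_foldB_nodup board n color (pvCells n) PySem.Set.empty PySem.Set.empty
    List.nodup_nil List.nodup_nil
  have hfil : ∀ colour, ((pvCells n).filter (pvACond board n colour)).Nodup :=
    fun colour => (pv_nodup_cells n).filter _
  have key : ∀ (s : List (Int × Int)) (colour : Int), s.Nodup →
      (∀ e, e ∈ s ↔ ∃ q ∈ pvCells n, pvCell board q.1 q.2 = colour ∧ pvNbr board n q e) →
      (s.length : Int) = pvAdjEmptyTo board n colour := by
    intro s colour hs hmem
    rw [pv_adjEmptyTo_eq_countP, List.countP_eq_length_filter]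
    congr 1
    refine ((List.perm_ext_iff_of_nodup hs (hfil colour)).mpr ?_).length_eq
    intro e
    rw [hmem e, List.mem_filter]
    constructor
    · rintro ⟨q, hq, hqc, hqn⟩
      have he : e ∈ pvCells n := by
        rcases hqn with ⟨d, hd, rfl, hinb, h0⟩
        exact (pv_mem_cells _ _).mpr hinb
      exact ⟨he, (pv_cond_iff board n colour e he).mpr ⟨q, hq, hqc, hqn⟩⟩
    · rintro ⟨he, hc⟩
      exact (pv_cond_iff board n colour e he).mp hc
  refine ⟨key _ color hnd.1 ?_, key _ (3 - color) hnd.2 ?_⟩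
  · intro e
    have := pv_foldB_mem board n color e hne (pvCells n) PySem.Set.empty PySem.Set.empty
    rw [this.1]
    simp [PySem.Set.empty]
  · intro e
    have := pv_foldB_mem board n color e hne (pvCells n) PySem.Set.empty PySem.Set.empty
    rw [this.2]
    simp [PySem.Set.empty]

-- ===== VERDICT (by name: the statement is the Claim_ definition above) =====
theorem potential_mobility_py_spec : Claim_equal_potential_mobility_py := by
  intro board color _ _
  unfold Spec_potential_mobility_py potential_mobility_py potential_mobility_py_alt
  have hne : color ≠ 3 - color := by omega
  have h := pv_set_length board (board.length : Int) color hne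
  dsimp only
  rw [pv_foldl_grid (f := fun p r c => pvStepB board (board.length : Int) color p (r, c)),
    ← pvCells]
  simp only [Prod.mk.eta]
  rw [show (fun (s : PySem.Set (Int × Int) × PySem.Set (Int × Int)) (e : Int × Int) =>
      pvStepB board (board.length : Int) color s e) = pvStepB board (board.length : Int) color
      from rfl]
  rw [← h.1, ← h.2]
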